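-- pv_equiv track=rewrite | github.com/fraylope/AdventJS_2025 | 07.py | draw_tree
-- ===== SOURCE A (Python) =====
-- def draw_tree(height, ornament, frequency):
--     width = 2 * height - 1
--     pos = 1
--     levels = []
--     for i in range(1, height + 1):
--         level_width = 2 * i -1
--         chars = []
--         for _ in range(level_width):
--             if pos % frequency == 0:
--                 chars.append(ornament)
--             else:
--                 chars.append('*')
--             pos += 1
--         level = ' ' * ((width - level_width) // 2) + ''.join(chars)
--         levels.append(level)
--
--     trunk = ' ' * (width // 2) + '#'
--     levels.append(trunk)
--
--     return '\n'.join(levels)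
-- ===== SOURCE B (Python) =====
-- def draw_tree(height, ornament, frequency):
--     # Flat-grid approach: paint all star cells at once, decorate every
--     # |frequency|-th cell by a strided write, then slice the grid into rows.
--     n = max(height, 0)
--     f = abs(frequency)
--     cells = ['*'] * (n * n)
--     for p in range(f - 1, n * n, f):
--         cells[p] = ornament
--     lines = [' ' * (n - i) + ''.join(cells[(i - 1) ** 2: i * i])
--              for i in range(1, n + 1)]
--     lines.append(' ' * (n - 1) + '#')
--     return '\n'.join(lines)
-- ===== Notes on version B (the rewrite author's own statement) =====
-- stated objective: alternative
-- what changed: B drops A's running pos counter and nested append loops: it paints a flat list of height^2 star cells, decorates every |frequency|-th cell with one strided write loop, then slices the flat grid into padded rows.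
-- outside the precondition, e.g. on draw_tree(0, 'o', 0): A returns '#', B raises ValueError; on draw_tree(3, 'o', 0): A raises ZeroDivisionError, B raises ValueError
import Mathlib
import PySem

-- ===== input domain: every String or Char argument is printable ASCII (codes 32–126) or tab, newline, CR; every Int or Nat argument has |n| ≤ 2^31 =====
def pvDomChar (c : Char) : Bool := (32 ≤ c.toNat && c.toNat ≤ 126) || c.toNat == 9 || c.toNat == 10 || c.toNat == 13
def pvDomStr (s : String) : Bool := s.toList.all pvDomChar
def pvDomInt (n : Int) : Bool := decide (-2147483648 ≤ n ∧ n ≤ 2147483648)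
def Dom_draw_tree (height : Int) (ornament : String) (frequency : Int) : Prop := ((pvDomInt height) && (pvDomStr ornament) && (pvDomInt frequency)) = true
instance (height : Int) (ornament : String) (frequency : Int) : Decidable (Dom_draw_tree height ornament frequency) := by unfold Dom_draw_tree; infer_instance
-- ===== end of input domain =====

-- B replaces A's running `pos` counter with a flat cell grid decorated by a strided
-- write and then sliced into rows (objective: alternative decomposition, same cost).


-- ===== PORT A =====
def draw_tree (height : Int) (ornament : String) (frequency : Int) : String :=
  let width := 2 * height - 1
  let st := (PySem.List.pyRange 1 (height + 1) 1).foldl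
    (fun (st : Int × List (List Char)) i =>
      let level_width := 2 * i - 1
      let inner := (PySem.List.pyRange 0 level_width 1).foldl
        (fun (st2 : Int × List (List Char)) _ =>
          (st2.1 + 1,
           st2.2 ++ [if PySem.Int.mod st2.1 frequency = 0 then ornament.toList else ['*']]))
        (st.1, [])
      let level := PySem.List.pyRepeat [' '] (PySem.Int.floordiv (width - level_width) 2) ++
        PySem.Chars.join [] inner.2
      (inner.1, st.2 ++ [level]))
    (1, [])
  let trunk := PySem.List.pyRepeat [' '] (PySem.Int.floordiv width 2) ++ ['#']
  String.ofList (PySem.Chars.join ['\n'] (st.2 ++ [trunk]))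

-- ===== PORT B =====
def draw_tree_alt (height : Int) (ornament : String) (frequency : Int) : String :=
  let n := max height 0
  let f := |frequency|
  let cells0 : List (List Char) := PySem.List.pyRepeat [['*']] (n * n)
  let cells := (PySem.List.pyRange (f - 1) (n * n) f).foldl
    (fun cs p => PySem.List.pySetD cs p ornament.toList) cells0
  let lines := (PySem.List.pyRange 1 (n + 1) 1).map (fun i =>
    PySem.List.pyRepeat [' '] (n - i) ++
      PySem.Chars.join [] (PySem.List.slice cells (some ((i - 1) ^ 2)) (some (i * i))))
  String.ofList (PySem.Chars.join ['\n'] (lines ++ [PySem.List.pyRepeat [' '] (n - 1) ++ ['#']]))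

-- ===== PRECONDITION & SPEC =====
-- Pre_ excludes frequency = 0: for height ≥ 1 A raises ZeroDivisionError there, and for
-- height ≤ 0 A's trunk-only return is reached only because its loop body is dead, while
-- B's own strided range(step = 0) raises ValueError.
def Pre_draw_tree (height : Int) (ornament : String) (frequency : Int) : Prop :=
  frequency ≠ 0
instance (height : Int) (ornament : String) (frequency : Int) : Decidable (Pre_draw_tree height ornament frequency) := by unfold Pre_draw_tree; infer_instance

def pvWitness_draw_tree : Int × String × Int := (4, "o", 3)

def Spec_draw_tree (height : Int) (ornament : String) (frequency : Int) (out : String) : Prop := out = draw_tree_alt height ornament frequency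
instance (height : Int) (ornament : String) (frequency : Int) (out : String) : Decidable (Spec_draw_tree height ornament frequency out) := by unfold Spec_draw_tree; infer_instance

-- ===== CLAIM (what is proved, stated in full; the proofs are below) =====
def Claim_equal_draw_tree : Prop := ∀ (height : Int) (ornament : String) (frequency : Int), Dom_draw_tree height ornament frequency → Pre_draw_tree height ornament frequency → Spec_draw_tree height ornament frequency (draw_tree height ornament frequency)

-- ===== LEMMAS AND PROOFS =====

-- ''.join of a list of strings is concatenation
lemma join_empty_sep (xss : List (List Char)) : PySem.Chars.join [] xss = xss.flatten := by
  induction xss with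
  | nil => simp [PySem.Chars.join_nil]
  | cons x rest ih =>
    cases rest with
    | nil => simp [PySem.Chars.join_singleton]
    | cons y t => simp [PySem.Chars.join_cons_cons, ih]

-- the character drawn at 1-based position p of the star stream
def cellChar (orn : List Char) (f : Int) (p : Int) : List Char :=
  if PySem.Int.mod p f = 0 then orn else ['*']

-- the row both programs produce for level i (closed form)
def rowSpec (orn : List Char) (f : Int) (h : Int) (i : Int) : List Char :=
  List.replicate (h - i).toNat ' ' ++
    ((List.range (2 * i - 1).toNat).map
      (fun (k : Nat) => cellChar orn f ((i - 1) ^ 2 + 1 + (k : Int)))).flatten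

-- A's inner loop: append the current character, increment pos
lemma innerA (orn : List Char) (f : Int) (l : List Int) (p : Int) (acc : List (List Char)) :
    l.foldl (fun (st2 : Int × List (List Char)) (_ : Int) =>
        (st2.1 + 1, st2.2 ++ [if PySem.Int.mod st2.1 f = 0 then orn else ['*']])) (p, acc)
    = (p + l.length, acc ++ (List.range l.length).map
        (fun (k : Nat) => if PySem.Int.mod (p + (k : Int)) f = 0 then orn else ['*'])) := by
  induction l generalizing p acc with
  | nil => simp
  | cons x t ih =>
    rw [List.foldl_cons, ih (p + 1)]
    have h1 : p + 1 + (t.length : Int) = p + ((t.length + 1 : Nat) : Int) := by push_cast; ring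
    have h2 : (acc ++ [if PySem.Int.mod p f = 0 then orn else ['*']]) ++
          (List.range t.length).map
            (fun (k : Nat) => if PySem.Int.mod (p + 1 + (k : Int)) f = 0 then orn else ['*'])
        = acc ++ (List.range (t.length + 1)).map
            (fun (k : Nat) => if PySem.Int.mod (p + (k : Int)) f = 0 then orn else ['*']) := by
      rw [List.range_succ_eq_map, List.map_cons, List.map_map]
      have hfun : ((fun (k : Nat) => if PySem.Int.mod (p + (k : Int)) f = 0 then orn else ['*'])
            ∘ Nat.succ)
          = fun (k : Nat) => if PySem.Int.mod (p + 1 + (k : Int)) f = 0 then orn else ['*'] := by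
        funext k
        simp only [Function.comp_apply, Nat.succ_eq_add_one]
        congr 2
        push_cast
        ring_nf
      rw [hfun]
      simp
    simp only [List.length_cons]
    exact Prod.ext h1 h2

lemma floordiv_two_mul (x : Int) : PySem.Int.floordiv (2 * x) 2 = x := by
  rw [PySem.Int.floordiv_eq_ediv_of_pos (by omega)]
  omega

-- A's outer loop, started at level i with pos = (i-1)^2 + 1
lemma outerA (orn : List Char) (f h : Int) (m : Nat) :
    ∀ (i : Int), 1 ≤ i → ∀ (acc : List (List Char)),
    (PySem.List.pyRange i (i + (m : Int)) 1).foldl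
      (fun (st : Int × List (List Char)) j =>
        (((PySem.List.pyRange 0 (2 * j - 1) 1).foldl
            (fun (st2 : Int × List (List Char)) _ =>
              (st2.1 + 1, st2.2 ++ [if PySem.Int.mod st2.1 f = 0 then orn else ['*']]))
            (st.1, [])).1,
         st.2 ++ [PySem.List.pyRepeat [' ']
              (PySem.Int.floordiv (2 * h - 1 - (2 * j - 1)) 2) ++
            PySem.Chars.join []
              (((PySem.List.pyRange 0 (2 * j - 1) 1).foldl
                (fun (st2 : Int × List (List Char)) _ =>
                  (st2.1 + 1, st2.2 ++ [if PySem.Int.mod st2.1 f = 0 then orn else ['*']]))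
                (st.1, [])).2)]))
      ((i - 1) ^ 2 + 1, acc)
    = ((i + (m : Int) - 1) ^ 2 + 1,
       acc ++ (PySem.List.pyRange i (i + (m : Int)) 1).map (rowSpec orn f h)) := by
  induction m with
  | zero =>
    intro i hi acc
    rw [show (i + ((0 : Nat) : Int)) = i by push_cast; ring, PySem.List.pyRange_one_eq_nil (by omega)]
    simp
  | succ m ih =>
    intro i hi acc
    have hcons : PySem.List.pyRange i (i + ((m + 1 : Nat) : Int)) 1
        = i :: PySem.List.pyRange (i + 1) ((i + 1) + (m : Int)) 1 := by
      rw [show (i + ((m + 1 : Nat) : Int)) = (i + 1) + (m : Int) by push_cast; ring,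
        PySem.List.pyRange_one_cons (by omega)]
    rw [hcons, List.foldl_cons, List.map_cons]
    rw [innerA]
    have hlen : (((PySem.List.pyRange 0 (2 * i - 1) 1).length : Nat) : Int) = 2 * i - 1 := by
      rw [PySem.List.length_pyRange_one]; omega
    have hpos : (i - 1) ^ 2 + 1 + ((PySem.List.pyRange 0 (2 * i - 1) 1).length : Int)
        = ((i + 1) - 1) ^ 2 + 1 := by
      rw [hlen]; ring_nf
    rw [hpos, ih (i + 1) (by omega)]
    refine Prod.ext (by push_cast; ring_nf) ?_
    simp only [List.append_assoc, List.cons_append, List.nil_append]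
    congr 1
    have hrow : PySem.List.pyRepeat [' '] (PySem.Int.floordiv (2 * h - 1 - (2 * i - 1)) 2) ++
        PySem.Chars.join [] ((List.range (PySem.List.pyRange 0 (2 * i - 1) 1).length).map
          (fun (k : Nat) =>
            if PySem.Int.mod ((i - 1) ^ 2 + 1 + (k : Int)) f = 0 then orn else ['*']))
        = rowSpec orn f h i := by
      unfold rowSpec
      congr 1
      · rw [PySem.List.pyRepeat_singleton,
          show (2 * h - 1 - (2 * i - 1)) = 2 * (h - i) by ring, floordiv_two_mul]
      · rw [join_empty_sep,
          show List.range (PySem.List.pyRange 0 (2 * i - 1) 1).length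
              = List.range (2 * i - 1).toNat by
            rw [PySem.List.length_pyRange_one]; congr 1; omega]
        rfl
    rw [hrow]

-- strided-write fold read back pointwise
lemma setfold_getElem? (v : List Char) (idxs : List Int) (hpos : ∀ p ∈ idxs, 0 ≤ p)
    (cs : List (List Char)) (k : Nat) (hk : k < cs.length) :
    (idxs.foldl (fun c p => PySem.List.pySetD c p v) cs)[k]?
    = if ((k : Int) ∈ idxs) then some v else cs[k]? := by
  induction idxs generalizing cs with
  | nil => simp
  | cons p t ih =>
    simp only [List.foldl_cons]
    have hp0 : 0 ≤ p := hpos p (by simp)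
    have hlen : (PySem.List.pySetD cs p v).length = cs.length := PySem.List.length_pySetD cs p v
    rw [ih (fun q hq => hpos q (by simp [hq])) _ (by omega)]
    by_cases hmem : (k : Int) ∈ t
    · simp [hmem]
    · simp only [hmem, if_false, List.mem_cons, or_false]
      rw [PySem.List.pySetD_of_nonneg cs v hp0]
      by_cases hpk : (k : Int) = p
      · have hnk : p.toNat = k := by omega
        subst hnk
        simp [hk, hpk]
      · have hnk : p.toNat ≠ k := by omega
        simp [List.getElem?_set_ne hnk, hpk]

lemma setfold_length (v : List Char) (idxs : List Int) (cs : List (List Char)) :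
    (idxs.foldl (fun c p => PySem.List.pySetD c p v) cs).length = cs.length := by
  induction idxs generalizing cs with
  | nil => rfl
  | cons p t ih => simp [List.foldl_cons, ih, PySem.List.length_pySetD]

-- the decorated grid is cellChar mapped over 1-based positions
lemma cells_eq (orn : List Char) (f : Int) (hf : f ≠ 0) (N : Nat) :
    (PySem.List.pyRange (|f| - 1) ((N : Int)) |f|).foldl
      (fun cs p => PySem.List.pySetD cs p orn) (PySem.List.pyRepeat [['*']] ((N : Int)))
    = (List.range N).map (fun (k : Nat) => cellChar orn f ((k : Int) + 1)) := by
  have habs : (0 : Int) < |f| := by positivity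
  have hrep : PySem.List.pyRepeat [['*']] ((N : Int)) = List.replicate N (['*'] : List Char) := by
    rw [PySem.List.pyRepeat_singleton]; simp
  rw [hrep]
  apply List.ext_getElem?
  intro k
  by_cases hk : k < N
  · rw [setfold_getElem? orn _ (fun p hp => by
        rcases (PySem.List.mem_pyRange_iff_of_pos habs p).mp hp with ⟨h1, _, _⟩; omega)
      _ k (by simpa using hk)]
    have hmemiff : ((k : Int) ∈ PySem.List.pyRange (|f| - 1) ((N : Int)) |f|)
        ↔ f ∣ ((k : Int) + 1) := by
      rw [PySem.List.mem_pyRange_iff_of_pos habs]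
      constructor
      · rintro ⟨_, _, d⟩
        have hd : |f| ∣ ((k : Int) + 1) := by
          have h2 : |f| ∣ ((k : Int) - (|f| - 1) + |f|) := dvd_add d (dvd_refl _)
          simpa [show (k : Int) - (|f| - 1) + |f| = (k : Int) + 1 by ring] using h2
        exact (abs_dvd f _).mp hd
      · intro d
        have d' : |f| ∣ ((k : Int) + 1) := (abs_dvd f _).mpr d
        refine ⟨?_, by exact_mod_cast hk, ?_⟩
        · have := Int.le_of_dvd (by omega) d'
          omega
        · have he : (k : Int) - (|f| - 1) = ((k : Int) + 1) - |f| := by ring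
          rw [he]
          exact dvd_sub d' (dvd_refl _)
    rw [List.getElem?_map, List.getElem?_range hk]
    by_cases hd : f ∣ ((k : Int) + 1)
    · rw [if_pos (hmemiff.mpr hd)]
      simp only [Option.map_some, cellChar]
      rw [if_pos ((PySem.Int.mod_eq_zero_iff_dvd _ _).mpr hd)]
    · rw [if_neg (fun hm => hd (hmemiff.mp hm))]
      simp only [Option.map_some, cellChar, List.getElem?_replicate, hk, if_pos]
      rw [if_neg (fun h0 => hd ((PySem.Int.mod_eq_zero_iff_dvd _ _).mp h0))]
  · rw [List.getElem?_eq_none (by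
        simpa [setfold_length, List.length_replicate] using Nat.le_of_not_lt hk),
      List.getElem?_eq_none (by simpa using Nat.le_of_not_lt hk)]

-- a slice of the mapped grid is a window of the map
lemma slice_cells (g : Nat → List Char) (N : Nat) (a w : Int) (ha : 0 ≤ a) (hw : 0 ≤ w)
    (hb : a.toNat + w.toNat ≤ N) :
    PySem.List.slice ((List.range N).map g) (some a) (some (a + w))
    = (List.range w.toNat).map (fun k => g (a.toNat + k)) := by
  rw [PySem.List.slice_toNat _ ha (by omega)]
  have hN : N = a.toNat + (N - a.toNat) := by omega
  rw [hN, List.range_add, List.map_append,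
    List.drop_left' (by simp), List.map_map, ← List.map_take, List.take_range,
    show ((a + w).toNat - a.toNat) = w.toNat by omega,
    show min w.toNat (N - a.toNat) = w.toNat by omega]
  rfl

-- ===== VERDICT (by name: the statement is the Claim_ definition above) =====
-- one row of B equals the closed-form row, for 1 ≤ i ≤ h
lemma rowB_eq (orn : List Char) (f h : Int) (hf : f ≠ 0) (hh : 1 ≤ h) (i : Int)
    (hi1 : 1 ≤ i) (hi2 : i ≤ h) :
    PySem.List.pyRepeat [' '] (h - i) ++
      PySem.Chars.join [] (PySem.List.slice
        ((PySem.List.pyRange (|f| - 1) (h * h) |f|).foldl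
          (fun cs p => PySem.List.pySetD cs p orn) (PySem.List.pyRepeat [['*']] (h * h)))
        (some ((i - 1) ^ 2)) (some (i * i)))
    = rowSpec orn f h i := by
  have hN : h * h = (((h * h).toNat : Nat) : Int) := by
    have : 0 ≤ h * h := by positivity
    omega
  rw [hN, cells_eq orn f hf]
  have ha : (0 : Int) ≤ (i - 1) ^ 2 := by positivity
  have hiw : i * i = (i - 1) ^ 2 + (2 * i - 1) := by ring
  have hbound : ((i - 1) ^ 2).toNat + (2 * i - 1).toNat ≤ (h * h).toNat := by
    have h1 : (i - 1) ^ 2 + (2 * i - 1) ≤ h * h := by nlinarith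
    have h2 : (0 : Int) ≤ 2 * i - 1 := by omega
    omega
  rw [hiw, slice_cells _ _ _ _ ha (by omega) hbound]
  unfold rowSpec
  congr 1
  · rw [PySem.List.pyRepeat_singleton]
  · rw [join_empty_sep]
    congr 1
    apply List.map_congr_left
    intro k hk
    unfold cellChar
    congr 2
    have h2 : ((((i - 1) ^ 2).toNat : Nat) : Int) = (i - 1) ^ 2 := by omega
    push_cast [h2]
    ring_nf

-- ===== VERDICT (by name: the statement is the Claim_ definition above) =====
theorem draw_tree_spec : Claim_equal_draw_tree := by
  intro h orn f _hDom hPre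
  unfold Spec_draw_tree draw_tree draw_tree_alt
  dsimp only
  by_cases hh : 1 ≤ h
  · -- nonempty tree
    rw [show max h 0 = h by omega]
    have houter := outerA orn.toList f h h.toNat 1 (le_refl 1) []
    rw [show ((1 : Int) - 1) ^ 2 + 1 = 1 by ring] at houter
    rw [show ((1 : Int) + (h.toNat : Int)) = h + 1 by omega] at houter
    rw [houter]
    refine congrArg String.ofList (congrArg (PySem.Chars.join ['\n']) ?_)
    rw [List.nil_append]
    show List.map (rowSpec orn.toList f h) (PySem.List.pyRange 1 (h + 1) 1) ++ _ = _
    congr 1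
    · -- the level rows agree
      refine (List.map_congr_left ?_).symm
      intro i hi
      rw [PySem.List.mem_pyRange_one] at hi
      exact rowB_eq orn.toList f h hPre hh i hi.1 (by omega)
    · -- the trunk line
      have htr : PySem.Int.floordiv (2 * h - 1) 2 = h - 1 := by
        rw [PySem.Int.floordiv_eq_ediv_of_pos (by omega)]
        omega
      rw [htr]
  · -- height ≤ 0: no levels, trunk only
    rw [show max h 0 = 0 by omega,
      PySem.List.pyRange_one_eq_nil (show h + 1 ≤ 1 by omega),
      PySem.List.pyRange_one_eq_nil (show (0 : Int) + 1 ≤ 1 by omega)]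
    simp only [List.foldl_nil, List.map_nil, List.nil_append]
    have htr : PySem.List.pyRepeat [' '] (PySem.Int.floordiv (2 * h - 1) 2)
        = PySem.List.pyRepeat [' '] ((0 : Int) - 1) := by
      rw [PySem.List.pyRepeat_singleton, PySem.List.pyRepeat_singleton]
      congr 1
      rw [PySem.Int.floordiv_eq_ediv_of_pos (by omega)]
      omega
    rw [htr]
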